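-- pv_equiv track=rewrite | github.com/josejoby/programming_questions | python/array_special_index.py | count_of_special_indices
-- ===== SOURCE A (Python) =====
-- def count_of_special_indices(A):
--     l=len(A)
--     cnt = 0
--     pf=[None]*l
--     pf[0] = A[0]
--     for _ in range(1, l):
--         pf[_] = pf[_-1]+A[_]
--     for _ in range(l):
--         leftsum=0
--         rightsum=0
--         if _ == 0:
--             rightsum=pf[l-1]
--         elif _+1 == l:
--             leftsum=pf[_-1]
--         else:
--             leftsum = pf[_-1]
--             rightsum = pf[l-1]-pf[_]
--         if leftsum == rightsum:
--             cnt+=1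
--     return cnt
-- ===== SOURCE B (Python) =====
-- def count_of_special_indices(A):
--     return sum(sum(A[:i]) == sum(A[i + 1:]) for i in range(len(A)))
-- ===== Notes on version B (the rewrite author's own statement) =====
-- stated objective: simpler
-- what changed: B discards A's prefix-sum array and its three per-index special cases entirely and counts by the textbook brute force: for each index, compare sum(A[:i]) with sum(A[i+1:]) directly on slices (quadratic, one line).
-- intended difference: On non-empty lists whose first element is non-zero and whose total sum is 0 or equals that first element, A counts index 0 iff the WHOLE sum (including A[0]) is 0, returning a count off by one, while B counts index 0 iff sum(A[1:]) is 0, which is the intended left-sum = right-sum condition. — e.g. on count_of_special_indices([5]): A returns 0, B returns 1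
import Mathlib
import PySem

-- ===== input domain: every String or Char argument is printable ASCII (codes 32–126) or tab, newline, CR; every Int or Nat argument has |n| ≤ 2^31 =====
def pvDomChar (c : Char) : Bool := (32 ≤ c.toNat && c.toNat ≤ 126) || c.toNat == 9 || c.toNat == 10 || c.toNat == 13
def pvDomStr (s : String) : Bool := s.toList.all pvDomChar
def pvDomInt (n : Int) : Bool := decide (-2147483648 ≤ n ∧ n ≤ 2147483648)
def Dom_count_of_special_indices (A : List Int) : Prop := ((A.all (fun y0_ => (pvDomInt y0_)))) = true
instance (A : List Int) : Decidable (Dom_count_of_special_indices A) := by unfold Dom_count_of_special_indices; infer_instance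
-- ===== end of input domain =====

-- B replaces A's prefix-sum array and per-index special cases with the textbook brute force
-- (compare sum(A[:i]) with sum(A[i+1:]) per index); quadratic but one line, objective: simpler.
-- Equivalence is claimed outside D_ (A's off-by-one at index 0).

-- ===== PORT A =====
def count_of_special_indices (A : List Int) : Int :=
  let l : Int := (A.length : Int)
  let pf : List Int :=
    (PySem.List.pyRange 1 l 1).foldl
      (fun pf i => pf ++ [PySem.List.pyGetD pf (i - 1) 0 + PySem.List.pyGetD A i 0])
      [PySem.List.pyGetD A 0 0]
  (PySem.List.pyRange 0 l 1).foldl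
    (fun cnt i =>
      let leftsum : Int :=
        if i = 0 then 0
        else if i + 1 = l then PySem.List.pyGetD pf (i - 1) 0
        else PySem.List.pyGetD pf (i - 1) 0
      let rightsum : Int :=
        if i = 0 then PySem.List.pyGetD pf (l - 1) 0
        else if i + 1 = l then 0
        else PySem.List.pyGetD pf (l - 1) 0 - PySem.List.pyGetD pf i 0
      if leftsum = rightsum then cnt + 1 else cnt) 0

-- ===== PORT B =====
def count_of_special_indices_alt (A : List Int) : Int :=
  (PySem.List.pyRange 0 (A.length : Int) 1).foldl
    (fun cnt i =>
      cnt + (if (PySem.List.slice A none (some i)).sum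
               = (PySem.List.slice A (some (i + 1)) none).sum then 1 else 0))
    0

-- ===== PRECONDITION & SPEC =====
-- Pre_ excludes only the empty list, on which A raises IndexError (at pf[0] = A[0]).
def Pre_count_of_special_indices (A : List Int) : Prop := A ≠ []
instance (A : List Int) : Decidable (Pre_count_of_special_indices A) := by
  unfold Pre_count_of_special_indices; infer_instance

def pvWitness_count_of_special_indices : List Int := [1, 2]

-- On non-empty lists with A[0] ≠ 0 and total sum 0 or equal to A[0], A counts index 0 iff the whole
-- sum (including A[0]) is 0 — an off-by-one — while B counts it iff sum(A[1:]) is 0,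
-- the intended left-sum = right-sum condition.
def D_count_of_special_indices (A : List Int) : Prop :=
  A ≠ [] ∧ A.headI ≠ 0 ∧ (A.sum = 0 ∨ A.sum = A.headI)
instance (A : List Int) : Decidable (D_count_of_special_indices A) := by
  unfold D_count_of_special_indices; infer_instance

def Spec_count_of_special_indices (A : List Int) (out : Int) : Prop :=
  ¬ D_count_of_special_indices A → out = count_of_special_indices_alt A
instance (A : List Int) (out : Int) : Decidable (Spec_count_of_special_indices A out) := by
  unfold Spec_count_of_special_indices; infer_instance

def pvDiffWitness_count_of_special_indices : List Int := [5]
def pvDiffWitnessOut_count_of_special_indices : Int × Int := (0, 1)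

-- ===== CLAIM (what is proved, stated in full; the proofs are below) =====
def Claim_unchanged_count_of_special_indices : Prop :=
  ∀ (A : List Int), Dom_count_of_special_indices A → Pre_count_of_special_indices A →
    Spec_count_of_special_indices A (count_of_special_indices A)
def Claim_changed_count_of_special_indices : Prop :=
  Dom_count_of_special_indices (pvDiffWitness_count_of_special_indices) ∧
  Pre_count_of_special_indices (pvDiffWitness_count_of_special_indices) ∧
  D_count_of_special_indices (pvDiffWitness_count_of_special_indices) ∧
  count_of_special_indices (pvDiffWitness_count_of_special_indices) = pvDiffWitnessOut_count_of_special_indices.1 ∧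
  count_of_special_indices_alt (pvDiffWitness_count_of_special_indices) = pvDiffWitnessOut_count_of_special_indices.2 ∧
  pvDiffWitnessOut_count_of_special_indices.1 ≠ pvDiffWitnessOut_count_of_special_indices.2
def Claim_exact_count_of_special_indices : Prop :=
  ∀ (A : List Int), Dom_count_of_special_indices A → Pre_count_of_special_indices A →
    D_count_of_special_indices A →
    count_of_special_indices A ≠ count_of_special_indices_alt A

-- ===== LEMMAS AND PROOFS =====

theorem pv_getD_map_range (f : Nat → Int) (n j : Nat) (hj : j < n) :
    ((List.range n).map f).getD j 0 = f j := by
  simp [List.getD, hj]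

theorem pv_take_succ_sum (A : List Int) (k : Nat) (hk : k < A.length) :
    (A.take (k + 1)).sum = (A.take k).sum + A.getD k 0 := by
  rw [List.getD_eq_getElem _ _ hk]
  exact List.sum_take_succ _ _ hk

theorem pv_take_len_sum (A : List Int) : (A.take A.length).sum = A.sum := by
  rw [List.take_length]

-- for-loop counting 'if cond: cnt += 1' as a 0/1 sum
theorem pv_cfold {α : Type} (p : α → Prop) [DecidablePred p] (L : List α) (c : Int) :
    L.foldl (fun cnt i => if p i then cnt + 1 else cnt) c
      = c + (L.map (fun i => if p i then (1 : Int) else 0)).sum := by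
  induction L generalizing c with
  | nil => simp
  | cons x xs ih =>
    simp only [List.foldl_cons, List.map_cons, List.sum_cons]
    rw [ih]
    by_cases h : p x <;> simp [h, add_comm, add_assoc, add_left_comm]

-- B's 'cnt + indicator' fold as a 0/1 sum
theorem pv_addfold {α : Type} (g : α → Int) (L : List α) (c : Int) :
    L.foldl (fun cnt i => cnt + g i) c = c + (L.map g).sum := by
  induction L generalizing c with
  | nil => simp
  | cons x xs ih =>
    simp only [List.foldl_cons, List.map_cons, List.sum_cons]
    rw [ih]; ring

-- B computes the 0/1 sum of the intended condition 2·prefix(k) + A[k] = sum over all indices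
theorem pv_alt_eq (A : List Int) :
    count_of_special_indices_alt A
      = ((List.range A.length).map
          (fun k => if 2 * (A.take k).sum + A.getD k 0 = A.sum then (1 : Int) else 0)).sum := by
  simp only [count_of_special_indices_alt]
  rw [PySem.List.pyRange_zero_natCast, List.foldl_map, pv_addfold, zero_add]
  congr 1
  apply List.map_congr_left
  intro k hk
  have hkn : k < A.length := List.mem_range.mp hk
  have h1 : PySem.List.slice A none (some ((k : Nat) : Int)) = A.take k :=
    PySem.List.slice_to_natCast A k
  have h2 : PySem.List.slice A (some (((k : Nat) : Int) + 1)) none = A.drop (k + 1) := by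
    rw [show ((k : Nat) : Int) + 1 = (((k + 1 : Nat)) : Int) by push_cast; ring]
    exact PySem.List.slice_from_natCast A (k + 1)
  rw [h1, h2]
  have hsum : A.sum = (A.take k).sum + A.getD k 0 + (A.drop (k + 1)).sum := by
    have h : A.sum = (A.take (k + 1)).sum + (A.drop (k + 1)).sum := by
      rw [← List.sum_append, List.take_append_drop]
    rw [h, pv_take_succ_sum A k hkn]
  exact if_congr (by omega) rfl rfl

-- A's first loop builds the prefix-sum list
theorem pv_pf (A : List Int) (hA : A ≠ []) : ∀ (n : Nat), 1 ≤ n → n ≤ A.length →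
    (PySem.List.pyRange 1 (n : Int) 1).foldl
        (fun pf i => pf ++ [PySem.List.pyGetD pf (i - 1) 0 + PySem.List.pyGetD A i 0])
        [PySem.List.pyGetD A 0 0]
      = (List.range n).map (fun k => (A.take (k + 1)).sum) := by
  intro n
  induction n with
  | zero => intro h _; omega
  | succ m ih =>
    intro _ h2
    by_cases hm : 1 ≤ m
    · have hcast : ((m + 1 : Nat) : Int) = (m : Int) + 1 := by push_cast; ring
      rw [hcast, PySem.List.pyRange_one_succ_right (by exact_mod_cast hm : (1 : Int) ≤ (m : Int)),
        List.foldl_append, ih hm (by omega)]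
      simp only [List.foldl_cons, List.foldl_nil]
      rw [List.range_succ, List.map_append, List.map_cons, List.map_nil]
      congr 1
      have hm1 : ((m : Int) - 1) = ((m - 1 : Nat) : Int) := by
        rw [Nat.cast_sub hm]; norm_num
      rw [hm1, PySem.List.pyGetD_natCast, PySem.List.pyGetD_natCast,
        pv_getD_map_range _ _ _ (by omega : m - 1 < m), Nat.sub_add_cancel hm]
      have hmlen : m < A.length := by omega
      rw [List.getD_eq_getElem _ _ hmlen]
      rw [pv_take_succ_sum A m hmlen, List.getD_eq_getElem _ _ hmlen]
    · have hm0 : m = 0 := by omega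
      subst hm0
      rw [show ((1 : Nat) : Int) = 1 by norm_num,
        PySem.List.pyRange_one_eq_nil (le_refl 1)]
      simp only [List.foldl_nil]
      congr 1
      rw [PySem.List.pyGetD_zero]
      cases A with
      | nil => exact absurd rfl hA
      | cons a xs => simp

-- A computes the same 0/1 sum except at index 0, where its condition is sum = 0
theorem pv_a_eq (A : List Int) (hA : A ≠ []) :
    count_of_special_indices A
      = ((List.range A.length).map
          (fun k => if k = 0 then (if A.sum = 0 then (1 : Int) else 0)
                    else (if 2 * (A.take k).sum + A.getD k 0 = A.sum then (1 : Int) else 0))).sum := by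
  have hlen : 1 ≤ A.length := by
    cases A with
    | nil => exact absurd rfl hA
    | cons a xs => simp
  simp only [count_of_special_indices]
  rw [pv_pf A hA A.length hlen (le_refl _)]
  rw [PySem.List.pyRange_zero_natCast, List.foldl_map]
  rw [pv_cfold, zero_add]
  congr 1
  apply List.map_congr_left
  intro k hk
  have hkn : k < A.length := List.mem_range.mp hk
  rcases Nat.eq_zero_or_pos k with hk0 | hk1
  · subst hk0
    rw [if_pos (by norm_num : ((0 : Nat) : Int) = 0), if_pos (by norm_num : ((0 : Nat) : Int) = 0),
      if_pos rfl]
    have hn1 : ((A.length : Int) - 1) = ((A.length - 1 : Nat) : Int) := by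
      rw [Nat.cast_sub hlen]; norm_num
    rw [hn1, PySem.List.pyGetD_natCast,
      pv_getD_map_range _ _ _ (by omega : A.length - 1 < A.length),
      Nat.sub_add_cancel hlen, pv_take_len_sum]
    exact if_congr ⟨fun h => h.symm, fun h => h.symm⟩ rfl rfl
  · have hknz : ¬ ((k : Nat) : Int) = 0 := by omega
    rw [if_neg hknz, if_neg hknz, if_neg (by omega : ¬ k = 0)]
    have hks : ((k : Int) - 1) = ((k - 1 : Nat) : Int) := by
      rw [Nat.cast_sub hk1]; norm_num
    have hSk : PySem.List.pyGetD ((List.range A.length).map (fun k => (A.take (k + 1)).sum)) ((k : Int) - 1) 0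
        = (A.take k).sum := by
      rw [hks, PySem.List.pyGetD_natCast, pv_getD_map_range _ _ _ (by omega : k - 1 < A.length),
        Nat.sub_add_cancel hk1]
    have hsum : A.sum = (A.take k).sum + A.getD k 0 + (A.drop (k + 1)).sum := by
      have h1 : A.sum = (A.take (k + 1)).sum + (A.drop (k + 1)).sum := by
        rw [← List.sum_append, List.take_append_drop]
      rw [h1, pv_take_succ_sum A k hkn]
    by_cases hkl : (k : Int) + 1 = (A.length : Int)
    · rw [if_pos hkl, if_pos hkl, hSk]
      have hkl' : k + 1 = A.length := by exact_mod_cast hkl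
      have hdrop : (A.drop (k + 1)).sum = 0 := by
        rw [hkl', List.drop_length]; rfl
      exact if_congr (by omega) rfl rfl
    · rw [if_neg hkl, if_neg hkl, hSk]
      have hn1 : ((A.length : Int) - 1) = ((A.length - 1 : Nat) : Int) := by
        rw [Nat.cast_sub hlen]; norm_num
      rw [hn1, PySem.List.pyGetD_natCast,
        pv_getD_map_range _ _ _ (by omega : A.length - 1 < A.length),
        Nat.sub_add_cancel hlen, pv_take_len_sum, PySem.List.pyGetD_natCast,
        pv_getD_map_range _ _ _ hkn]
      have hSk1 : (A.take (k + 1)).sum = (A.take k).sum + A.getD k 0 := pv_take_succ_sum A k hkn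
      exact if_congr (by omega) rfl rfl

theorem pv_head_getD (A : List Int) (hA : A ≠ []) : A.getD 0 0 = A.headI := by
  cases A with
  | nil => exact absurd rfl hA
  | cons a xs => simp

-- the two 0/1 sums agree on every index except possibly 0
theorem pv_sum_split (A : List Int) (hA : A ≠ []) :
    ∃ T : Int,
      ((List.range A.length).map
          (fun k => if k = 0 then (if A.sum = 0 then (1 : Int) else 0)
                    else (if 2 * (A.take k).sum + A.getD k 0 = A.sum then (1 : Int) else 0))).sum
        = (if A.sum = 0 then (1 : Int) else 0) + T ∧
      ((List.range A.length).map
          (fun k => if 2 * (A.take k).sum + A.getD k 0 = A.sum then (1 : Int) else 0)).sum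
        = (if A.getD 0 0 = A.sum then (1 : Int) else 0) + T := by
  obtain ⟨m, hm⟩ : ∃ m, A.length = m + 1 := by
    cases A with
    | nil => exact absurd rfl hA
    | cons a xs => exact ⟨xs.length, by simp⟩
  refine ⟨((List.range m).map
      (fun k => if 2 * (A.take (k + 1)).sum + A.getD (k + 1) 0 = A.sum then (1 : Int) else 0)).sum,
      ?_, ?_⟩
  · rw [hm, List.range_succ_eq_map]
    simp only [List.map_cons, List.sum_cons, List.map_map]
    have htail : (List.map
        ((fun k => if k = 0 then (if A.sum = 0 then (1 : Int) else 0)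
            else (if 2 * (A.take k).sum + A.getD k 0 = A.sum then (1 : Int) else 0)) ∘ Nat.succ)
        (List.range m)).sum
        = ((List.range m).map
            (fun k => if 2 * (A.take (k + 1)).sum + A.getD (k + 1) 0 = A.sum then (1 : Int) else 0)).sum := by
      apply congrArg List.sum
      apply List.map_congr_left
      intro k _
      simp [Function.comp]
    rw [htail]
    simp
  · rw [hm, List.range_succ_eq_map]
    simp only [List.map_cons, List.sum_cons, List.map_map]
    have htail : (List.map
        ((fun k => if 2 * (A.take k).sum + A.getD k 0 = A.sum then (1 : Int) else 0) ∘ Nat.succ)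
        (List.range m)).sum
        = ((List.range m).map
            (fun k => if 2 * (A.take (k + 1)).sum + A.getD (k + 1) 0 = A.sum then (1 : Int) else 0)).sum := by
      apply congrArg List.sum
      apply List.map_congr_left
      intro k _
      simp [Function.comp]
    rw [htail]
    simp only [List.take_zero, List.sum_nil, mul_zero, zero_add]

-- ===== VERDICT (by name: the statement is the Claim_ definition above) =====
theorem count_of_special_indices_spec : Claim_unchanged_count_of_special_indices := by
  intro A _ hPre hnD
  rw [pv_a_eq A hPre, pv_alt_eq A]
  obtain ⟨T, h1, h2⟩ := pv_sum_split A hPre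
  rw [h1, h2]
  have h0 : A.getD 0 0 = A.headI := pv_head_getD A hPre
  simp only [D_count_of_special_indices, not_and, not_or] at hnD
  have hnD' := hnD hPre
  split_ifs <;> omega

theorem count_of_special_indices_changed : Claim_changed_count_of_special_indices := by
  unfold Claim_changed_count_of_special_indices; decide

theorem count_of_special_indices_tight : Claim_exact_count_of_special_indices := by
  intro A _ hPre hD
  rw [pv_a_eq A hPre, pv_alt_eq A]
  obtain ⟨T, h1, h2⟩ := pv_sum_split A hPre
  rw [h1, h2]
  have h0 : A.getD 0 0 = A.headI := pv_head_getD A hPre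
  obtain ⟨-, hh, hs⟩ := hD
  split_ifs <;> omega
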